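-- pv_equiv track=rewrite | github.com/hoh/nix-manipulator | tests/internal/integration/test_reproduce_nixpkgs.py | _patch_indentation_only
-- ===== SOURCE A (Python) =====
-- def _patch_indentation_only(source: str, rebuilt: str) -> str | None:
--     """Patch indentation-only diffs where indentation changes by 0 or 2 spaces.
--
--     Returns a source variant whose leading whitespace matches `rebuilt` on any
--     line where the stripped content is identical. If any line differs after
--     stripping, line counts differ, or indentation delta is not 0 or 2 spaces,
--     return None to signal a real change.
--     """
--     source_lines = source.splitlines()
--     rebuilt_lines = rebuilt.splitlines()
--     if len(source_lines) != len(rebuilt_lines):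
--         # Structural change (line count) is not an indentation-only diff.
--         return None
--
--     patched_lines: list[str] = []
--     for idx, (source_line, rebuilt_line) in enumerate(
--         zip(source_lines, rebuilt_lines)
--     ):
--         if source_line == rebuilt_line:
--             patched_lines.append(source_line)
--             continue
--         # Only accept indentation changes; content must match after lstrip.
--         if source_line.lstrip() != rebuilt_line.lstrip():
--             return None
--         source_indent = len(source_line) - len(source_line.lstrip(" "))
--         rebuilt_indent = len(rebuilt_line) - len(rebuilt_line.lstrip(" "))
--         if abs(rebuilt_indent - source_indent) not in (0, 2):
--             return None
--         # Keep rebuilt indentation while preserving identical content.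
--         patched_lines.append(rebuilt_line)
--     return "\n".join(patched_lines)
-- ===== SOURCE B (Python) =====
-- def _patch_indentation_only(source: str, rebuilt: str) -> str | None:
--     """Staged whole-list validation: the 'identical line' branch of the original
--     is redundant (identical lines have equal stripped content and delta 0), so
--     compare the stripped-content lists as wholes, then the space-indent deltas;
--     on success the answer is just the joined rebuilt lines."""
--     src = source.splitlines()
--     reb = rebuilt.splitlines()
--     if len(src) != len(reb):
--         return None
--     if [line.lstrip() for line in src] != [line.lstrip() for line in reb]:
--         return None
--     src_ind = [len(line) - len(line.lstrip(" ")) for line in src]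
--     reb_ind = [len(line) - len(line.lstrip(" ")) for line in reb]
--     if any(abs(i - j) not in (0, 2) for i, j in zip(reb_ind, src_ind)):
--         return None
--     return "\n".join(reb)
-- ===== Notes on version B (the rewrite author's own statement) =====
-- stated objective: simpler
-- what changed: B removes A's per-line 'identical line' branch as provably redundant and replaces the single accumulating guard loop by staged whole-list passes: equality of the two stripped-content lists, then a check of the space-indent delta list, then join of the rebuilt lines.
import Mathlib
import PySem

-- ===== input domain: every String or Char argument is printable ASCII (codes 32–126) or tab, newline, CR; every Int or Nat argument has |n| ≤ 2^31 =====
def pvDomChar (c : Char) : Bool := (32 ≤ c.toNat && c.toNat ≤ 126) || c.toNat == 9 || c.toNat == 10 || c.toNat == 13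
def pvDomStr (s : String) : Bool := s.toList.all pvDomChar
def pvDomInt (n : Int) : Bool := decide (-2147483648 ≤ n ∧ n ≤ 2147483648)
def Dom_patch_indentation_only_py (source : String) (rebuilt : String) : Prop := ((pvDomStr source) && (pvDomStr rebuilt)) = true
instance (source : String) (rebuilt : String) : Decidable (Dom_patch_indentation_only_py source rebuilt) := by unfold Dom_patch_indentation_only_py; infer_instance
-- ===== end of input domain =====

-- B drops A's redundant identical-line branch and validates in staged whole-list passes (stripped-content lists, then indent deltas) instead of one accumulating guard loop (objective: simpler).


-- ===== PORT A =====
-- len(line) - len(line.lstrip(" ")): lstrip(" ") with the single-char set " " is ported by hand as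
-- dropWhile (· == ' '), which is exact (strip leading ' ' characters only).
def pvIndent (cs : List Char) : Int :=
  (PySem.Chars.len cs : Int) - (PySem.Chars.len (cs.dropWhile (· == ' ')) : Int)

-- A's for-loop over zip(source_lines, rebuilt_lines) with the accumulating patched_lines and early returns.
def pvLoopA : List (List Char × List Char) → List (List Char) → Option (List (List Char))
  | [], acc => some acc
  | (s, r) :: rest, acc =>
    if s = r then pvLoopA rest (acc ++ [s])
    else if PySem.Chars.lstrip s ≠ PySem.Chars.lstrip r then none
    else if ¬ ((pvIndent r - pvIndent s).natAbs = 0 ∨ (pvIndent r - pvIndent s).natAbs = 2) then none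
    else pvLoopA rest (acc ++ [r])

def patch_indentation_only_py (source : String) (rebuilt : String) : Option String :=
  let source_lines := PySem.Chars.splitlines source.toList
  let rebuilt_lines := PySem.Chars.splitlines rebuilt.toList
  if source_lines.length ≠ rebuilt_lines.length then none
  else
    match pvLoopA (source_lines.zip rebuilt_lines) [] with
    | none => none
    | some patched => some (String.ofList (PySem.Chars.join ['\n'] patched))

-- ===== PORT B =====
-- [line.lstrip() for line in lines]
def pvStripped (lines : List (List Char)) : List (List Char) := lines.map PySem.Chars.lstrip
-- [len(line) - len(line.lstrip(" ")) for line in lines]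
def pvIndents (lines : List (List Char)) : List Int := lines.map pvIndent
-- abs(i - j) not in (0, 2)
def pvBadDelta (p : Int × Int) : Bool := !((p.1 - p.2).natAbs == 0 || (p.1 - p.2).natAbs == 2)

def patch_indentation_only_py_alt (source : String) (rebuilt : String) : Option String :=
  let src := PySem.Chars.splitlines source.toList
  let reb := PySem.Chars.splitlines rebuilt.toList
  if src.length ≠ reb.length then none
  else if pvStripped src ≠ pvStripped reb then none
  else if ((pvIndents reb).zip (pvIndents src)).any pvBadDelta then none
  else some (String.ofList (PySem.Chars.join ['\n'] reb))

-- ===== PRECONDITION & SPEC =====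
def Spec_patch_indentation_only_py (source : String) (rebuilt : String) (out : Option String) : Prop := out = patch_indentation_only_py_alt source rebuilt
instance (source : String) (rebuilt : String) (out : Option String) : Decidable (Spec_patch_indentation_only_py source rebuilt out) := by unfold Spec_patch_indentation_only_py; infer_instance

-- ===== CLAIM (what is proved, stated in full; the proofs are below) =====
def Claim_equal_patch_indentation_only_py : Prop := ∀ (source : String) (rebuilt : String), Dom_patch_indentation_only_py source rebuilt → Spec_patch_indentation_only_py source rebuilt (patch_indentation_only_py source rebuilt)

-- ===== LEMMAS AND PROOFS =====

-- A's per-pair acceptance condition (proofs below reduce A's loop to it).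
def pvOkA (s r : List Char) : Bool :=
  s == r ||
    (PySem.Chars.lstrip s == PySem.Chars.lstrip r &&
      ((pvIndent r - pvIndent s).natAbs == 0 || (pvIndent r - pvIndent s).natAbs == 2))

-- A's loop characterised: it succeeds iff every pair passes pvOkA, and then the
-- accumulated lines are exactly the rebuilt (second) components appended to acc.
theorem pvLoopA_eq (pairs : List (List Char × List Char)) (acc : List (List Char)) :
    pvLoopA pairs acc =
      if pairs.all (fun p => pvOkA p.1 p.2) then some (acc ++ pairs.map Prod.snd) else none := by
  induction pairs generalizing acc with
  | nil => simp [pvLoopA]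
  | cons p rest ih =>
    obtain ⟨s, r⟩ := p
    rw [List.all_cons]
    by_cases hsr : s = r
    · subst hsr
      have hok : pvOkA s s = true := by simp [pvOkA]
      rw [show pvLoopA ((s, s) :: rest) acc = pvLoopA rest (acc ++ [s]) from by
        simp [pvLoopA]]
      rw [ih, hok, Bool.true_and]
      simp
    · have hbe : (s == r) = false := beq_eq_false_iff_ne.mpr hsr
      simp only [pvLoopA, if_neg hsr]
      by_cases hls : PySem.Chars.lstrip s = PySem.Chars.lstrip r
      · rw [if_neg (by simp [hls])]
        by_cases habs : (pvIndent r - pvIndent s).natAbs = 0 ∨ (pvIndent r - pvIndent s).natAbs = 2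
        · have hok : pvOkA s r = true := by
            rcases habs with h | h <;> simp [pvOkA, hls, h]
          rw [if_neg (not_not_intro habs), ih, hok, Bool.true_and]
          simp
        · have hok : pvOkA s r = false := by
            rw [not_or] at habs
            simp [pvOkA, hbe, hls, habs.1, habs.2]
          rw [if_pos habs, hok]
          simp
      · have hok : pvOkA s r = false := by
          simp [pvOkA, hbe, beq_eq_false_iff_ne.mpr hls]
        rw [if_pos (by simpa using hls), hok]
        simp

-- The identical-line branch is redundant: pvOkA factors into B's two per-pair conditions.
theorem pvOkA_factor (s r : List Char) :
    pvOkA s r = ((PySem.Chars.lstrip s == PySem.Chars.lstrip r) && !pvBadDelta (pvIndent r, pvIndent s)) := by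
  by_cases hsr : s = r
  · subst hsr; simp [pvOkA, pvBadDelta]
  · simp [pvOkA, pvBadDelta, beq_eq_false_iff_ne.mpr hsr]

-- Staged whole-list checks ⟺ pairwise check, for equal-length lists.
theorem staged_eq_all (sl rl : List (List Char)) (h : sl.length = rl.length) :
    ((sl.zip rl).all (fun p => pvOkA p.1 p.2)) =
      ((pvStripped sl == pvStripped rl) && !((pvIndents rl).zip (pvIndents sl)).any pvBadDelta) := by
  induction sl generalizing rl with
  | nil =>
    cases rl with
    | nil => simp [pvStripped, pvIndents]
    | cons r rs => simp at h
  | cons s ss ih =>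
    cases rl with
    | nil => simp at h
    | cons r rs =>
      have hlen : ss.length = rs.length := by simpa using h
      have ht := ih rs hlen
      simp only [pvStripped, pvIndents, List.map_cons] at ht ⊢
      simp only [pvOkA_factor] at ht
      simp only [List.zip_cons_cons, List.all_cons, List.any_cons, List.cons_beq_cons,
        pvOkA_factor, ht, Bool.not_or]
      cases PySem.Chars.lstrip s == PySem.Chars.lstrip r <;>
        cases pvBadDelta (pvIndent r, pvIndent s) <;> simp

theorem patch_indentation_only_py_spec : Claim_equal_patch_indentation_only_py := by
  intro source rebuilt _
  show patch_indentation_only_py source rebuilt = patch_indentation_only_py_alt source rebuilt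
  unfold patch_indentation_only_py patch_indentation_only_py_alt
  set sl := PySem.Chars.splitlines source.toList with hsl
  set rl := PySem.Chars.splitlines rebuilt.toList with hrl
  by_cases hlen : sl.length ≠ rl.length
  · simp [hlen]
  · rw [not_not] at hlen
    simp only [hlen, ne_eq, not_true_eq_false, if_false]
    rw [pvLoopA_eq, staged_eq_all sl rl hlen]
    by_cases hstr : pvStripped sl = pvStripped rl
    · simp only [hstr, beq_self_eq_true, Bool.true_and, not_true_eq_false, if_false]
      by_cases hany : ((pvIndents rl).zip (pvIndents sl)).any pvBadDelta
      · simp [hany]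
      · simp [hany, List.map_snd_zip (le_of_eq hlen.symm)]
    · simp [hstr, beq_eq_false_iff_ne.mpr hstr]
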